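-- pv_equiv track=rewrite | github.com/waperdomob/prueba-habi | algorithm/block_sort.py | sort_blocks
-- ===== SOURCE A (Python) =====
-- def sort_blocks(arreglo: list[int]) -> str:
--     if not arreglo:
--         return "X"
--
--     bloques = []
--     bloque_actual = []
--
--     for num in arreglo:
--         if num == 0:
--             bloques.append(bloque_actual)
--             bloque_actual = []
--         else:
--             bloque_actual.append(num)
--
--     bloques.append(bloque_actual)
--
--     resultado = []
--     for bloque in bloques:
--         if not bloque:
--             resultado.append("X")
--         else:
--             bloque.sort()
--             bloque_str = ''.join(str(n) for n in bloque)
--             resultado.append(bloque_str)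
--
--     return ' '.join(resultado)
-- ===== SOURCE B (Python) =====
-- def _fmt(bloque):
--     return 'X' if not bloque else ''.join(str(n) for n in sorted(bloque))
--
--
-- def sort_blocks(arreglo: list[int]) -> str:
--     if 0 in arreglo:
--         i = arreglo.index(0)
--         return _fmt(arreglo[:i]) + ' ' + sort_blocks(arreglo[i + 1:])
--     return _fmt(arreglo)
-- ===== Notes on version B (the rewrite author's own statement) =====
-- stated objective: alternative
-- what changed: Replaced the two-phase accumulate-blocks-then-format loop with a recursive decomposition: find the first zero with list.index, format the prefix slice, and recurse on the suffix, so no intermediate list of blocks is built.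
import Mathlib
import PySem

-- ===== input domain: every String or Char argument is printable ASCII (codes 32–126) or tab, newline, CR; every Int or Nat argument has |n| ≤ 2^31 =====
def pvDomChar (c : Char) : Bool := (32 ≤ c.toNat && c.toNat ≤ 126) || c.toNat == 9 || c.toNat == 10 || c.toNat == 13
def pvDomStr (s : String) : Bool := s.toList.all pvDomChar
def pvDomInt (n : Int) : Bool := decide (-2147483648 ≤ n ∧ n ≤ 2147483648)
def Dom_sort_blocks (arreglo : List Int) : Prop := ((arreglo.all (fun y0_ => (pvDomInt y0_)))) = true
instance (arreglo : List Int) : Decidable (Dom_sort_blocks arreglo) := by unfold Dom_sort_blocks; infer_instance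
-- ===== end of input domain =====

-- B replaces A's accumulate-current-block loop (build all blocks, then format) by a
-- recursive decomposition on the first zero: format the prefix slice, recurse on the
-- suffix (objective: alternative; same cost).

-- ===== PORT A =====
def sort_blocks (arreglo : List Int) : String :=
  if arreglo = [] then "X"
  else
    let st := arreglo.foldl
      (fun (st : List (List Int) × List Int) num =>
        if num == 0 then (st.1 ++ [st.2], []) else (st.1, st.2 ++ [num]))
      ([], [])
    let bloques := st.1 ++ [st.2]
    let resultado := bloques.map (fun bloque =>
      if bloque = [] then "X"
      else PySem.Str.join "" ((PySem.List.sorted bloque (fun x => x) false).map PySem.Int.toStr))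
    PySem.Str.join " " resultado

-- ===== PORT B =====
-- B's helper _fmt
def pvFmt (bloque : List Int) : String :=
  if bloque = [] then "X"
  else PySem.Str.join "" ((PySem.List.sorted bloque (fun x => x) false).map PySem.Int.toStr)

def sort_blocks_alt (arreglo : List Int) : String :=
  match h : PySem.List.index? arreglo 0 with
  | some i =>
      pvFmt (PySem.List.slice arreglo none (some (i : Int))) ++ " " ++
        sort_blocks_alt (PySem.List.slice arreglo (some ((i : Int) + 1)) none)
  | none => pvFmt arreglo
termination_by arreglo.length
decreasing_by
  obtain ⟨hk, -, -⟩ := PySem.List.getElem_of_index?_eq_some h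
  rw [PySem.List.slice_from arreglo (by omega : (0:Int) ≤ (i : Int) + 1)]
  simp only [List.length_drop]
  omega

-- ===== PRECONDITION & SPEC =====
def Spec_sort_blocks (arreglo : List Int) (out : String) : Prop := out = sort_blocks_alt arreglo
instance (arreglo : List Int) (out : String) : Decidable (Spec_sort_blocks arreglo out) := by unfold Spec_sort_blocks; infer_instance

-- ===== CLAIM (what is proved, stated in full; the proofs are below) =====
def Claim_equal_sort_blocks : Prop := ∀ (arreglo : List Int), Dom_sort_blocks arreglo → Spec_sort_blocks arreglo (sort_blocks arreglo)

-- ===== LEMMAS AND PROOFS =====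

/-- Specification mediator: the list of zero-separated blocks of `xs`. -/
def splitZ : List Int → List (List Int)
  | [] => [[]]
  | x :: xs =>
      if x = 0 then [] :: splitZ xs
      else
        match splitZ xs with
        | [] => [[x]]
        | b :: bs => (x :: b) :: bs

theorem splitZ_ne_nil (xs : List Int) : splitZ xs ≠ [] := by
  induction xs with
  | nil => simp [splitZ]
  | cons x xs ih =>
      simp only [splitZ]
      split_ifs
      · simp
      · cases h : splitZ xs <;> simp

theorem splitZ_no_zero (xs : List Int) (h : (0:Int) ∉ xs) : splitZ xs = [xs] := by
  induction xs with
  | nil => rfl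
  | cons x xs ih =>
      simp only [List.mem_cons, not_or] at h
      simp [splitZ, Ne.symm h.1, ih h.2]

theorem splitZ_append (pre suf : List Int) (h : (0:Int) ∉ pre) :
    splitZ (pre ++ 0 :: suf) = pre :: splitZ suf := by
  induction pre with
  | nil => simp [splitZ]
  | cons x p ih =>
      simp only [List.mem_cons, not_or] at h
      simp [splitZ, Ne.symm h.1, ih h.2, splitZ]

/-- Characterisation of A's first loop: the final `bloques ++ [bloque_actual]`. -/
theorem foldA_eq (xs : List Int) : ∀ (acc : List (List Int)) (cur b : List Int)
    (bs : List (List Int)), splitZ xs = b :: bs →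
    (xs.foldl
        (fun (st : List (List Int) × List Int) num =>
          if num == 0 then (st.1 ++ [st.2], []) else (st.1, st.2 ++ [num]))
        (acc, cur)).1 ++
      [(xs.foldl
        (fun (st : List (List Int) × List Int) num =>
          if num == 0 then (st.1 ++ [st.2], []) else (st.1, st.2 ++ [num]))
        (acc, cur)).2] = acc ++ (cur ++ b) :: bs := by
  induction xs with
  | nil =>
      intro acc cur b bs h
      simp only [splitZ, List.cons.injEq] at h
      simp [← h.1, ← h.2]
  | cons x xs ih =>
      intro acc cur b bs h
      by_cases hx : x = 0
      · subst hx
        rw [show splitZ ((0:Int) :: xs) = [] :: splitZ xs from by simp [splitZ]] at h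
        rw [List.cons.injEq] at h
        obtain ⟨b' , bs', hs⟩ : ∃ b' bs', splitZ xs = b' :: bs' := by
          cases hsp : splitZ xs with
          | nil => exact absurd hsp (splitZ_ne_nil xs)
          | cons a l => exact ⟨a, l, rfl⟩
        simp only [List.foldl_cons, beq_self_eq_true, if_pos]
        rw [ih (acc ++ [cur]) [] b' bs' hs]
        rw [← h.1, ← h.2, hs]
        simp
      · have hx' : (x == (0:Int)) = false := by simp [hx]
        simp only [splitZ, if_neg hx] at h
        obtain ⟨b', bs', hs⟩ : ∃ b' bs', splitZ xs = b' :: bs' := by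
          cases hsp : splitZ xs with
          | nil => exact absurd hsp (splitZ_ne_nil xs)
          | cons a l => exact ⟨a, l, rfl⟩
        rw [hs] at h
        simp only [List.cons.injEq] at h
        simp only [List.foldl_cons, hx', Bool.false_eq_true, if_neg, not_false_iff]
        rw [ih acc (cur ++ [x]) b' bs' hs, ← h.1, ← h.2]
        simp

theorem sort_blocks_eq_splitZ (xs : List Int) :
    sort_blocks xs = PySem.Str.join " " ((splitZ xs).map pvFmt) := by
  by_cases hnil : xs = []
  · subst hnil; decide
  · obtain ⟨b, bs, hs⟩ : ∃ b bs, splitZ xs = b :: bs := by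
      cases hsp : splitZ xs with
      | nil => exact absurd hsp (splitZ_ne_nil xs)
      | cons a l => exact ⟨a, l, rfl⟩
    unfold sort_blocks
    rw [if_neg hnil]
    have := foldA_eq xs [] [] b bs hs
    simp only at this ⊢
    rw [this, hs]
    rfl

/-- Python string join over a nonempty tail: peel one element. -/
theorem str_join_cons (sep a : String) (r : List String) (h : r ≠ []) :
    PySem.Str.join sep (a :: r) = a ++ sep ++ PySem.Str.join sep r := by
  cases r with
  | nil => exact absurd rfl h
  | cons q rest =>
      apply String.ext
      rw [PySem.Str.toList_join]
      simp only [List.map_cons]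
      rw [PySem.Chars.join_cons_cons]
      simp [PySem.Str.toList_join]

theorem str_join_singleton (sep a : String) : PySem.Str.join sep [a] = a := by
  apply String.ext
  rw [PySem.Str.toList_join]
  simp [PySem.Chars.join_singleton]

theorem sort_blocks_alt_eq_splitZ (xs : List Int) :
    sort_blocks_alt xs = PySem.Str.join " " ((splitZ xs).map pvFmt) := by
  induction hn : xs.length using Nat.strong_induction_on generalizing xs with
  | _ n ih =>
    subst hn
    unfold sort_blocks_alt
    split
    next i h =>
        obtain ⟨pre, suf, hxs, hlen, hpre⟩ := (PySem.List.index?_eq_some_iff xs 0 i).mp h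
        have hto : PySem.List.slice xs none (some (i : Int)) = pre := by
          rw [PySem.List.slice_to_natCast, hxs, ← hlen]
          simp
        have hfrom : PySem.List.slice xs (some ((i : Int) + 1)) none = suf := by
          have : ((i : Int) + 1) = ((i + 1 : Nat) : Int) := by push_cast; ring
          rw [this, PySem.List.slice_from_natCast, hxs, ← hlen]
          simp [List.drop_append]
        rw [hto, hfrom, hxs, splitZ_append pre suf hpre]
        have hlt : suf.length < xs.length := by rw [hxs]; simp; omega
        rw [ih suf.length hlt suf rfl]
        rw [List.map_cons, str_join_cons]
        simp [splitZ_ne_nil]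
    next h =>
        rw [PySem.List.index?_eq_none_iff] at h
        rw [splitZ_no_zero xs h]
        simp [str_join_singleton]

-- ===== VERDICT (by name: the statement is the Claim_ definition above) =====
theorem sort_blocks_spec : Claim_equal_sort_blocks := by
  intro arreglo _
  unfold Spec_sort_blocks
  rw [sort_blocks_eq_splitZ, sort_blocks_alt_eq_splitZ]
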